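-- pv_equiv track=rewrite | github.com/giusSacco/MERGE-RNA | interactive_arcplots.py | _dotbracket_to_pairs
-- ===== SOURCE A (Python) =====
-- from typing import Any, Dict, List, Optional, Sequence, Tuple
-- from typing import Any, Dict, Iterable, List, Optional, Sequence, Tuple
--
-- def _dotbracket_to_pairs(structure: str) -> List[Tuple[int, int]]:
--     """Convert a dot-bracket structure into paired index tuples."""
--     openers = {
--         "(": ")",
--         "[": "]",
--         "{": "}",
--         "<": ">",
--     }
--     closers = {v: k for k, v in openers.items()}
--     stack: Dict[str, List[int]] = {ch: [] for ch in openers.keys()}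
--     pairs: List[Tuple[int, int]] = []
--     for idx, ch in enumerate(structure):
--         if ch in openers:
--             stack[ch].append(idx)
--         elif ch in closers:
--             opener = closers[ch]
--             if not stack[opener]:
--                 continue
--             start = stack[opener].pop()
--             pairs.append((start, idx))
--     return pairs
-- ===== SOURCE B (Python) =====
-- from typing import List, Tuple
--
--
-- def _dotbracket_to_pairs(structure: str) -> List[Tuple[int, int]]:
--     """Convert a dot-bracket structure into paired index tuples.
--
--     One independent stack scan per bracket type, then a single sort by the
--     closing index (unique) restores the original emission order.
--     """
--     pairs: List[Tuple[int, int]] = []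
--     for opener, closer in (("(", ")"), ("[", "]"), ("{", "}"), ("<", ">")):
--         stack: List[int] = []
--         for idx, ch in enumerate(structure):
--             if ch == opener:
--                 stack.append(idx)
--             elif ch == closer:
--                 if stack:
--                     pairs.append((stack.pop(), idx))
--     pairs.sort(key=lambda p: p[1])
--     return pairs
-- ===== Notes on version B (the rewrite author's own statement) =====
-- stated objective: alternative
-- what changed: Replaces the single pass with a per-character dict of stacks by four independent per-bracket-type stack scans whose collected pairs are then sorted once by the (unique) closing index to restore the original order.
import Mathlib
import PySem

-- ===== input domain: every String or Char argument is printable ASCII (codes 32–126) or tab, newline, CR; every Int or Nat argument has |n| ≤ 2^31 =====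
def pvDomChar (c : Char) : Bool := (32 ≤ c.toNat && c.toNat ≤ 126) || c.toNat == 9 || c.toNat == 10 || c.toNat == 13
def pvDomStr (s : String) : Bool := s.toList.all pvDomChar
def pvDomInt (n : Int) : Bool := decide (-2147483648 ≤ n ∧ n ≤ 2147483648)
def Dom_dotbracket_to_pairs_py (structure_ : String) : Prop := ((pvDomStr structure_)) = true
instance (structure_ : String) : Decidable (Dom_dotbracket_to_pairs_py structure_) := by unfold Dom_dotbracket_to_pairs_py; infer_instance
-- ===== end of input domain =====

-- B replaces A's one-pass dict-of-stacks scan by four independent per-bracket-type stack scans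
-- followed by one sort on the (unique) closing index: an alternative decomposition, not faster.


-- ===== PORT A =====
-- openers = {"(": ")", "[": "]", "{": "}", "<": ">"}
def pvOpeners : PySem.Dict Char Char :=
  PySem.Dict.ofList [('(', ')'), ('[', ']'), ('{', '}'), ('<', '>')]
-- closers = {v: k for k, v in openers.items()}
def pvClosers : PySem.Dict Char Char :=
  PySem.Dict.ofList (pvOpeners.items.map (fun p => (p.2, p.1)))
-- stack = {ch: [] for ch in openers.keys()}
def pvStack0 : PySem.Dict Char (List Int) :=
  PySem.Dict.ofList (pvOpeners.keys.map (fun ch => (ch, ([] : List Int))))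
-- the body of A's for-loop over enumerate(structure); stack[opener].pop() = getLast / dropLast
def pvAStep (st : PySem.Dict Char (List Int) × List (Int × Int)) :
    Int × Char → PySem.Dict Char (List Int) × List (Int × Int)
  | (idx, ch) =>
    if pvOpeners.contains ch then
      (st.1.modify ch [] (fun l => l ++ [idx]), st.2)
    else if pvClosers.contains ch then
      let opener := (pvClosers.get? ch).getD ch
      let s := st.1.getD opener []
      if s.isEmpty then st
      else (st.1.insert opener s.dropLast, st.2 ++ [(s.getLast?.getD 0, idx)])
    else st

def dotbracket_to_pairs_py (structure_ : String) : List (Int × Int) :=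
  ((PySem.List.enumerate structure_.toList 0).foldl pvAStep (pvStack0, [])).2

-- ===== PORT B =====
-- the body of B's inner loop for bracket type (op, cl); stack.pop() = getLast / dropLast
def pvBStep (op cl : Char) (st : List Int × List (Int × Int)) :
    Int × Char → List Int × List (Int × Int)
  | (idx, ch) =>
    if ch = op then (st.1 ++ [idx], st.2)
    else if ch = cl then
      if st.1.isEmpty then st
      else (st.1.dropLast, st.2 ++ [(st.1.getLast?.getD 0, idx)])
    else st

def dotbracket_to_pairs_py_alt (structure_ : String) : List (Int × Int) :=
  let xs := PySem.List.enumerate structure_.toList 0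
  let pairs := [('(', ')'), ('[', ']'), ('{', '}'), ('<', '>')].foldl
    (fun acc oc => (xs.foldl (pvBStep oc.1 oc.2) ([], acc)).2) []
  PySem.List.sorted pairs (fun p => p.2) false

-- ===== PRECONDITION & SPEC =====
def Spec_dotbracket_to_pairs_py (structure_ : String) (out : List (Int × Int)) : Prop := out = dotbracket_to_pairs_py_alt structure_
instance (structure_ : String) (out : List (Int × Int)) : Decidable (Spec_dotbracket_to_pairs_py structure_ out) := by unfold Spec_dotbracket_to_pairs_py; infer_instance

-- ===== CLAIM (what is proved, stated in full; the proofs are below) =====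
def Claim_equal_dotbracket_to_pairs_py : Prop := ∀ (structure_ : String), Dom_dotbracket_to_pairs_py structure_ → Spec_dotbracket_to_pairs_py structure_ (dotbracket_to_pairs_py structure_)

-- ===== LEMMAS AND PROOFS =====

-- the two literal dicts of A, as literal item lists
theorem pvOpeners_mk : pvOpeners = PySem.Dict.mk [('(', ')'), ('[', ']'), ('{', '}'), ('<', '>')] := by decide
theorem pvClosers_mk : pvClosers = PySem.Dict.mk [(')', '('), (']', '['), ('}', '{'), ('>', '<')] := by decide

-- one step of B's inner scan: stack independent of the accumulator, accumulator factors out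
theorem pvBStep_fst (op cl : Char) (s : List Int) (acc : List (Int × Int)) (p : Int × Char) :
    (pvBStep op cl (s, acc) p).1 = (pvBStep op cl (s, []) p).1 := by
  obtain ⟨idx, ch⟩ := p
  by_cases h1 : ch = op
  · simp [pvBStep, h1]
  · by_cases h2 : ch = cl
    · subst h2
      by_cases h3 : s = [] <;> simp [pvBStep, h1, h3]
    · simp [pvBStep, h1, h2]

theorem pvBStep_snd (op cl : Char) (s : List Int) (acc : List (Int × Int)) (p : Int × Char) :
    (pvBStep op cl (s, acc) p).2 = acc ++ (pvBStep op cl (s, []) p).2 := by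
  obtain ⟨idx, ch⟩ := p
  by_cases h1 : ch = op
  · simp [pvBStep, h1]
  · by_cases h2 : ch = cl
    · subst h2
      by_cases h3 : s = [] <;> simp [pvBStep, h1, h3]
    · simp [pvBStep, h1, h2]

-- B's inner scan: the accumulated pairs list factors out of the fold.
theorem pvB_acc (op cl : Char) (xs : List (Int × Char)) :
    ∀ (s : List Int) (acc : List (Int × Int)),
      xs.foldl (pvBStep op cl) (s, acc)
        = ((xs.foldl (pvBStep op cl) (s, [])).1,
            acc ++ (xs.foldl (pvBStep op cl) (s, [])).2) := by
  induction xs with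
  | nil => intro s acc; simp
  | cons p xs ih =>
    intro s acc
    rcases h : pvBStep op cl (s, []) p with ⟨s', b⟩
    have hf := pvBStep_fst op cl s acc p
    have hs2 := pvBStep_snd op cl s acc p
    rw [h] at hf hs2
    have pairEq : pvBStep op cl (s, acc) p = (s', acc ++ b) :=
      Prod.ext_iff.mpr ⟨hf, hs2⟩
    rw [List.foldl_cons, List.foldl_cons, pairEq, h, ih s' (acc ++ b), ih s' b]
    simp [List.append_assoc]

-- A's accumulator, one step: either unchanged or one pair closing at the current index appended.
theorem pvAStep_snd (st : PySem.Dict Char (List Int) × List (Int × Int)) (idx : Int) (ch : Char) :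
    (pvAStep st (idx, ch)).2 = st.2 ∨ ∃ v : Int, (pvAStep st (idx, ch)).2 = st.2 ++ [(v, idx)] := by
  simp only [pvAStep]
  split_ifs <;> first | exact Or.inl rfl | exact Or.inr ⟨_, rfl⟩

-- After A's fold starting at index n, the pairs list stays strictly increasing in the
-- closing index, and all closing indices stay below the running index.
theorem pvA_pairwise (chars : List Char) :
    ∀ (n : Int) (d : PySem.Dict Char (List Int)) (acc : List (Int × Int)),
      (∀ q ∈ acc, q.2 < n) → acc.Pairwise (fun a b => a.2 < b.2) →
      (((PySem.List.enumerate chars n).foldl pvAStep (d, acc)).2).Pairwise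
        (fun a b => a.2 < b.2)
      ∧ ∀ q ∈ ((PySem.List.enumerate chars n).foldl pvAStep (d, acc)).2,
          q.2 < n + chars.length := by
  induction chars with
  | nil =>
    intro n d acc hlt hpw
    simp only [PySem.List.enumerate_nil, List.foldl_nil, List.length_nil]
    exact ⟨hpw, fun q hq => by have := hlt q hq; omega⟩
  | cons c cs ih =>
    intro n d acc hlt hpw
    rw [PySem.List.enumerate_cons]
    simp only [List.foldl_cons]
    have hstep := pvAStep_snd (d, acc) n c
    have hnext : (∀ q ∈ (pvAStep (d, acc) (n, c)).2, q.2 < n + 1)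
        ∧ ((pvAStep (d, acc) (n, c)).2).Pairwise (fun a b => a.2 < b.2) := by
      rcases hstep with h | ⟨v, h⟩
      · rw [h]; exact ⟨fun q hq => by have := hlt q hq; omega, hpw⟩
      · rw [h]
        constructor
        · intro q hq
          rcases List.mem_append.1 hq with hq | hq
          · have := hlt q hq; omega
          · simp at hq; subst hq; omega
        · refine List.pairwise_append.2 ⟨hpw, by simp, ?_⟩
          intro a ha b hb
          simp at hb; subst hb
          exact hlt a ha
    have h2 : (pvAStep (d, acc) (n, c)) =
        ((pvAStep (d, acc) (n, c)).1, (pvAStep (d, acc) (n, c)).2) := rfl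
    rw [h2]
    have := ih (n + 1) (pvAStep (d, acc) (n, c)).1 (pvAStep (d, acc) (n, c)).2
      hnext.1 hnext.2
    refine ⟨this.1, fun q hq => ?_⟩
    have := this.2 q hq
    simp only [List.length_cons]
    push_cast at this ⊢
    omega

-- The main invariant: A's fold result is a permutation of the four per-type scans' results,
-- provided A's dict holds exactly the four stacks and the accumulators are a permutation.
theorem pvA_perm (xs : List (Int × Char)) :
    ∀ (d : PySem.Dict Char (List Int)) (accA a1 a2 a3 a4 : List (Int × Int))
      (s1 s2 s3 s4 : List Int),
      d.getD '(' [] = s1 → d.getD '[' [] = s2 → d.getD '{' [] = s3 → d.getD '<' [] = s4 →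
      accA.Perm (a1 ++ a2 ++ a3 ++ a4) →
      ((xs.foldl pvAStep (d, accA)).2).Perm
        ((xs.foldl (pvBStep '(' ')') (s1, a1)).2 ++ (xs.foldl (pvBStep '[' ']') (s2, a2)).2
          ++ (xs.foldl (pvBStep '{' '}') (s3, a3)).2 ++ (xs.foldl (pvBStep '<' '>') (s4, a4)).2) := by
  induction xs with
  | nil => intro d accA a1 a2 a3 a4 s1 s2 s3 s4 h1 h2 h3 h4 hp; simpa using hp
  | cons p xs ih =>
    intro d accA a1 a2 a3 a4 s1 s2 s3 s4 h1 h2 h3 h4 hp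
    obtain ⟨idx, ch⟩ := p
    simp only [List.foldl_cons]
    by_cases hc1 : ch = '('
    · subst hc1
      rw [show pvAStep (d, accA) (idx, '(') = (d.modify '(' [] (fun l => l ++ [idx]), accA) by
            simp [pvAStep, pvOpeners_mk],
          show pvBStep '(' ')' (s1, a1) (idx, '(') = (s1 ++ [idx], a1) by simp [pvBStep],
          show pvBStep '[' ']' (s2, a2) (idx, '(') = (s2, a2) by simp [pvBStep],
          show pvBStep '{' '}' (s3, a3) (idx, '(') = (s3, a3) by simp [pvBStep],
          show pvBStep '<' '>' (s4, a4) (idx, '(') = (s4, a4) by simp [pvBStep]]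
      exact ih _ _ _ _ _ _ _ _ _ _
        (by rw [PySem.Dict.getD_modify, if_pos rfl, h1])
        (by rw [PySem.Dict.getD_modify, if_neg (by decide), h2])
        (by rw [PySem.Dict.getD_modify, if_neg (by decide), h3])
        (by rw [PySem.Dict.getD_modify, if_neg (by decide), h4])
        hp
    · by_cases hc2 : ch = '['
      · subst hc2
        rw [show pvAStep (d, accA) (idx, '[') = (d.modify '[' [] (fun l => l ++ [idx]), accA) by
              simp [pvAStep, pvOpeners_mk],
            show pvBStep '(' ')' (s1, a1) (idx, '[') = (s1, a1) by simp [pvBStep],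
            show pvBStep '[' ']' (s2, a2) (idx, '[') = (s2 ++ [idx], a2) by simp [pvBStep],
            show pvBStep '{' '}' (s3, a3) (idx, '[') = (s3, a3) by simp [pvBStep],
            show pvBStep '<' '>' (s4, a4) (idx, '[') = (s4, a4) by simp [pvBStep]]
        exact ih _ _ _ _ _ _ _ _ _ _
          (by rw [PySem.Dict.getD_modify, if_neg (by decide), h1])
          (by rw [PySem.Dict.getD_modify, if_pos rfl, h2])
          (by rw [PySem.Dict.getD_modify, if_neg (by decide), h3])
          (by rw [PySem.Dict.getD_modify, if_neg (by decide), h4])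
          hp
      · by_cases hc3 : ch = '{'
        · subst hc3
          rw [show pvAStep (d, accA) (idx, '{') = (d.modify '{' [] (fun l => l ++ [idx]), accA) by
                simp [pvAStep, pvOpeners_mk],
              show pvBStep '(' ')' (s1, a1) (idx, '{') = (s1, a1) by simp [pvBStep],
              show pvBStep '[' ']' (s2, a2) (idx, '{') = (s2, a2) by simp [pvBStep],
              show pvBStep '{' '}' (s3, a3) (idx, '{') = (s3 ++ [idx], a3) by simp [pvBStep],
              show pvBStep '<' '>' (s4, a4) (idx, '{') = (s4, a4) by simp [pvBStep]]
          exact ih _ _ _ _ _ _ _ _ _ _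
            (by rw [PySem.Dict.getD_modify, if_neg (by decide), h1])
            (by rw [PySem.Dict.getD_modify, if_neg (by decide), h2])
            (by rw [PySem.Dict.getD_modify, if_pos rfl, h3])
            (by rw [PySem.Dict.getD_modify, if_neg (by decide), h4])
            hp
        · by_cases hc4 : ch = '<'
          · subst hc4
            rw [show pvAStep (d, accA) (idx, '<') = (d.modify '<' [] (fun l => l ++ [idx]), accA) by
                  simp [pvAStep, pvOpeners_mk],
                show pvBStep '(' ')' (s1, a1) (idx, '<') = (s1, a1) by simp [pvBStep],
                show pvBStep '[' ']' (s2, a2) (idx, '<') = (s2, a2) by simp [pvBStep],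
                show pvBStep '{' '}' (s3, a3) (idx, '<') = (s3, a3) by simp [pvBStep],
                show pvBStep '<' '>' (s4, a4) (idx, '<') = (s4 ++ [idx], a4) by simp [pvBStep]]
            exact ih _ _ _ _ _ _ _ _ _ _
              (by rw [PySem.Dict.getD_modify, if_neg (by decide), h1])
              (by rw [PySem.Dict.getD_modify, if_neg (by decide), h2])
              (by rw [PySem.Dict.getD_modify, if_neg (by decide), h3])
              (by rw [PySem.Dict.getD_modify, if_pos rfl, h4])
              hp
          · by_cases hd1 : ch = ')'
            · subst hd1
              rw [show pvBStep '[' ']' (s2, a2) (idx, ')') = (s2, a2) by simp [pvBStep],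
                  show pvBStep '{' '}' (s3, a3) (idx, ')') = (s3, a3) by simp [pvBStep],
                  show pvBStep '<' '>' (s4, a4) (idx, ')') = (s4, a4) by simp [pvBStep]]
              by_cases hs : s1 = []
              · rw [show pvAStep (d, accA) (idx, ')') = (d, accA) by
                      simp [pvAStep, pvOpeners_mk, pvClosers_mk, PySem.Dict.get?_mk_cons, h1, hs],
                    show pvBStep '(' ')' (s1, a1) (idx, ')') = (s1, a1) by simp [pvBStep, hs]]
                exact ih _ _ _ _ _ _ _ _ _ _ h1 h2 h3 h4 hp
              · rw [show pvAStep (d, accA) (idx, ')') =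
                      (d.insert '(' s1.dropLast, accA ++ [(s1.getLast?.getD 0, idx)]) by
                      simp [pvAStep, pvOpeners_mk, pvClosers_mk, PySem.Dict.get?_mk_cons, h1, hs],
                    show pvBStep '(' ')' (s1, a1) (idx, ')') =
                      (s1.dropLast, a1 ++ [(s1.getLast?.getD 0, idx)]) by simp [pvBStep, hs]]
                refine ih _ _ _ _ _ _ _ _ _ _
                  (by rw [PySem.Dict.getD_insert, if_pos rfl])
                  (by rw [PySem.Dict.getD_insert, if_neg (by decide), h2])
                  (by rw [PySem.Dict.getD_insert, if_neg (by decide), h3])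
                  (by rw [PySem.Dict.getD_insert, if_neg (by decide), h4])
                  ((hp.append_right _).trans ?_)
                rw [List.perm_iff_count]
                intro a; simp [List.count_append, List.count_cons]; try omega
            · by_cases hd2 : ch = ']'
              · subst hd2
                rw [show pvBStep '(' ')' (s1, a1) (idx, ']') = (s1, a1) by simp [pvBStep],
                    show pvBStep '{' '}' (s3, a3) (idx, ']') = (s3, a3) by simp [pvBStep],
                    show pvBStep '<' '>' (s4, a4) (idx, ']') = (s4, a4) by simp [pvBStep]]
                by_cases hs : s2 = []
                · rw [show pvAStep (d, accA) (idx, ']') = (d, accA) by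
                        simp [pvAStep, pvOpeners_mk, pvClosers_mk, PySem.Dict.get?_mk_cons, h2, hs],
                      show pvBStep '[' ']' (s2, a2) (idx, ']') = (s2, a2) by simp [pvBStep, hs]]
                  exact ih _ _ _ _ _ _ _ _ _ _ h1 h2 h3 h4 hp
                · rw [show pvAStep (d, accA) (idx, ']') =
                        (d.insert '[' s2.dropLast, accA ++ [(s2.getLast?.getD 0, idx)]) by
                        simp [pvAStep, pvOpeners_mk, pvClosers_mk, PySem.Dict.get?_mk_cons, h2, hs],
                      show pvBStep '[' ']' (s2, a2) (idx, ']') =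
                        (s2.dropLast, a2 ++ [(s2.getLast?.getD 0, idx)]) by simp [pvBStep, hs]]
                  refine ih _ _ _ _ _ _ _ _ _ _
                    (by rw [PySem.Dict.getD_insert, if_neg (by decide), h1])
                    (by rw [PySem.Dict.getD_insert, if_pos rfl])
                    (by rw [PySem.Dict.getD_insert, if_neg (by decide), h3])
                    (by rw [PySem.Dict.getD_insert, if_neg (by decide), h4])
                    ((hp.append_right _).trans ?_)
                  rw [List.perm_iff_count]
                  intro a; simp [List.count_append, List.count_cons]; try omega
              · by_cases hd3 : ch = '}'
                · subst hd3
                  rw [show pvBStep '(' ')' (s1, a1) (idx, '}') = (s1, a1) by simp [pvBStep],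
                      show pvBStep '[' ']' (s2, a2) (idx, '}') = (s2, a2) by simp [pvBStep],
                      show pvBStep '<' '>' (s4, a4) (idx, '}') = (s4, a4) by simp [pvBStep]]
                  by_cases hs : s3 = []
                  · rw [show pvAStep (d, accA) (idx, '}') = (d, accA) by
                          simp [pvAStep, pvOpeners_mk, pvClosers_mk, PySem.Dict.get?_mk_cons, h3, hs],
                        show pvBStep '{' '}' (s3, a3) (idx, '}') = (s3, a3) by simp [pvBStep, hs]]
                    exact ih _ _ _ _ _ _ _ _ _ _ h1 h2 h3 h4 hp
                  · rw [show pvAStep (d, accA) (idx, '}') =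
                          (d.insert '{' s3.dropLast, accA ++ [(s3.getLast?.getD 0, idx)]) by
                          simp [pvAStep, pvOpeners_mk, pvClosers_mk, PySem.Dict.get?_mk_cons, h3, hs],
                        show pvBStep '{' '}' (s3, a3) (idx, '}') =
                          (s3.dropLast, a3 ++ [(s3.getLast?.getD 0, idx)]) by simp [pvBStep, hs]]
                    refine ih _ _ _ _ _ _ _ _ _ _
                      (by rw [PySem.Dict.getD_insert, if_neg (by decide), h1])
                      (by rw [PySem.Dict.getD_insert, if_neg (by decide), h2])
                      (by rw [PySem.Dict.getD_insert, if_pos rfl])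
                      (by rw [PySem.Dict.getD_insert, if_neg (by decide), h4])
                      ((hp.append_right _).trans ?_)
                    rw [List.perm_iff_count]
                    intro a; simp [List.count_append, List.count_cons]; try omega
                · by_cases hd4 : ch = '>'
                  · subst hd4
                    rw [show pvBStep '(' ')' (s1, a1) (idx, '>') = (s1, a1) by simp [pvBStep],
                        show pvBStep '[' ']' (s2, a2) (idx, '>') = (s2, a2) by simp [pvBStep],
                        show pvBStep '{' '}' (s3, a3) (idx, '>') = (s3, a3) by simp [pvBStep]]
                    by_cases hs : s4 = []
                    · rw [show pvAStep (d, accA) (idx, '>') = (d, accA) by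
                            simp [pvAStep, pvOpeners_mk, pvClosers_mk, PySem.Dict.get?_mk_cons, h4, hs],
                          show pvBStep '<' '>' (s4, a4) (idx, '>') = (s4, a4) by simp [pvBStep, hs]]
                      exact ih _ _ _ _ _ _ _ _ _ _ h1 h2 h3 h4 hp
                    · rw [show pvAStep (d, accA) (idx, '>') =
                            (d.insert '<' s4.dropLast, accA ++ [(s4.getLast?.getD 0, idx)]) by
                            simp [pvAStep, pvOpeners_mk, pvClosers_mk, PySem.Dict.get?_mk_cons, h4, hs],
                          show pvBStep '<' '>' (s4, a4) (idx, '>') =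
                            (s4.dropLast, a4 ++ [(s4.getLast?.getD 0, idx)]) by simp [pvBStep, hs]]
                      refine ih _ _ _ _ _ _ _ _ _ _
                        (by rw [PySem.Dict.getD_insert, if_neg (by decide), h1])
                        (by rw [PySem.Dict.getD_insert, if_neg (by decide), h2])
                        (by rw [PySem.Dict.getD_insert, if_neg (by decide), h3])
                        (by rw [PySem.Dict.getD_insert, if_pos rfl])
                        ((hp.append_right _).trans ?_)
                      rw [List.perm_iff_count]
                      intro a; simp [List.count_append, List.count_cons]; try omega
                  · rw [show pvAStep (d, accA) (idx, ch) = (d, accA) by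
                          simp [pvAStep, pvOpeners_mk, pvClosers_mk,
                            Ne.symm hc1, Ne.symm hc2, Ne.symm hc3, Ne.symm hc4,
                            Ne.symm hd1, Ne.symm hd2, Ne.symm hd3, Ne.symm hd4],
                        show pvBStep '(' ')' (s1, a1) (idx, ch) = (s1, a1) by
                          simp [pvBStep, hc1, hd1],
                        show pvBStep '[' ']' (s2, a2) (idx, ch) = (s2, a2) by
                          simp [pvBStep, hc2, hd2],
                        show pvBStep '{' '}' (s3, a3) (idx, ch) = (s3, a3) by
                          simp [pvBStep, hc3, hd3],
                        show pvBStep '<' '>' (s4, a4) (idx, ch) = (s4, a4) by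
                          simp [pvBStep, hc4, hd4]]
                    exact ih _ _ _ _ _ _ _ _ _ _ h1 h2 h3 h4 hp

-- ===== VERDICT (by name: the statement is the Claim_ definition above) =====
theorem dotbracket_to_pairs_py_spec : Claim_equal_dotbracket_to_pairs_py := by
  intro s _
  unfold Spec_dotbracket_to_pairs_py dotbracket_to_pairs_py dotbracket_to_pairs_py_alt
  simp only [List.foldl_cons, List.foldl_nil]
  rw [pvB_acc '<' '>', pvB_acc '{' '}', pvB_acc '[' ']', pvB_acc '(' ')']
  simp only [List.nil_append]
  have hperm := pvA_perm (PySem.List.enumerate s.toList 0) pvStack0 [] [] [] [] [] [] [] [] []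
      (by decide) (by decide) (by decide) (by decide) (by simp)
  have hpw := (pvA_pairwise s.toList 0 pvStack0 [] (by simp) (by simp)).1
  exact (PySem.List.sorted_eq_of_perm_of_pairwise_lt _ _ _ hperm hpw).symm
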